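-- pv_equiv track=rewrite | github.com/PootisHunter/Coding-Work | Python/Ninjalaskuri.py | laske_ninjat
-- ===== SOURCE A (Python) =====
-- def laske_ninjat(x, y, rakenne):
--     n = 0
--     leveys = max(len(l) for l in rakenne)
--     for b, _ in enumerate(reversed(rakenne)):
--         for a in (k for k in range(leveys) if 0 <= x < leveys):
--             if a in (x-1, x, x+1):
--                 if b in (y-1, y, y+1):
--                     if rakenne[b][a] == "N":
--                         n += 1
--     return n
-- ===== SOURCE B (Python) =====
-- def laske_ninjat(x, y, rakenne):
--     # Count 'N' cells in the 3x3 neighborhood of column x, row y,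
--     # by indexing only the up-to-9 neighbor cells (A scans the whole grid).
--     leveys = max(len(l) for l in rakenne)
--     if not 0 <= x < leveys:
--         return 0
--     n = 0
--     for b in range(max(y - 1, 0), min(y + 2, len(rakenne))):
--         rivi = rakenne[b]
--         for a in range(max(x - 1, 0), min(x + 2, leveys)):
--             if rivi[a] == "N":
--                 n += 1
--     return n
-- ===== Notes on version B (the rewrite author's own statement) =====
-- stated objective: faster
-- what changed: Instead of scanning every cell of the whole grid with membership tests, B directly iterates over the clipped 3x3 neighborhood ranges, doing O(1) cell reads after an O(rows) width computation.
import Mathlib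
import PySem

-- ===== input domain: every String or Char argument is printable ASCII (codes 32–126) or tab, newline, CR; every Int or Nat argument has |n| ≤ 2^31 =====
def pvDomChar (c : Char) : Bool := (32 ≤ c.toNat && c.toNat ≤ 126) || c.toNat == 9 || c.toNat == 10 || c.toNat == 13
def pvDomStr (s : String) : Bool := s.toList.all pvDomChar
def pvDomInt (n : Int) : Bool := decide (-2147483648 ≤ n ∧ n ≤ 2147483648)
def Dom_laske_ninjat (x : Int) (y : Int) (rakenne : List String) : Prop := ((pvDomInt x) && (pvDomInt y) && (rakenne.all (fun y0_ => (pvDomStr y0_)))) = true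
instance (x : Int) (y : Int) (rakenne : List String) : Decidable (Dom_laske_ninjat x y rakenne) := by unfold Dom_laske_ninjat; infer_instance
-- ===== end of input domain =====

-- B replaces A's full-grid scan by direct iteration over the clipped 3x3 neighborhood (faster; return value only, no side effects).

-- shared helper: leveys = max(len(l) for l in rakenne)  (Python max raises on [], excluded by Pre_)
def pvLeveys (rakenne : List String) : Int :=
  (PySem.List.max? (rakenne.map (fun l => PySem.Str.len l)) (fun v => v)).getD 0

-- ===== PORT A =====
-- rakenne[b][a] == "N": one-char string comparison, exact as Char equality; indexing totalized
-- with getD defaults, Pre_ guarantees the Python indexing never raises.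
def laske_ninjat (x : Int) (y : Int) (rakenne : List String) : Int :=
  let leveys := pvLeveys rakenne
  (PySem.List.enumerate rakenne.reverse 0).foldl
    (fun n bp =>
      ((PySem.List.pyRange 0 leveys 1).filter (fun _ => decide (0 ≤ x ∧ x < leveys))).foldl
        (fun n a =>
          if a = x - 1 ∨ a = x ∨ a = x + 1 then
            if bp.1 = y - 1 ∨ bp.1 = y ∨ bp.1 = y + 1 then
              if (PySem.Str.pyGet? (PySem.List.pyGetD rakenne bp.1 "") a).getD ' ' = 'N' then n + 1
              else n
            else n
          else n)
        n)
    0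

-- ===== PORT B =====
def laske_ninjat_alt (x : Int) (y : Int) (rakenne : List String) : Int :=
  let leveys := pvLeveys rakenne
  if 0 ≤ x ∧ x < leveys then
    (PySem.List.pyRange (max (y - 1) 0) (min (y + 2) (rakenne.length : Int)) 1).foldl
      (fun n b =>
        (PySem.List.pyRange (max (x - 1) 0) (min (x + 2) leveys) 1).foldl
          (fun n a =>
            if (PySem.Str.pyGet? (PySem.List.pyGetD rakenne b "") a).getD ' ' = 'N' then n + 1
            else n)
          n)
      0
  else 0

-- ===== PRECONDITION & SPEC =====
-- Pre_ excludes exactly the inputs where Python A raises: the empty grid (max() of an empty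
-- sequence, ValueError) and ragged grids where A indexes a neighbor column beyond a shorter
-- row's length (IndexError).
def Pre_laske_ninjat (x : Int) (y : Int) (rakenne : List String) : Prop :=
  rakenne ≠ [] ∧
  (0 ≤ x → x < pvLeveys rakenne →
    ∀ b ∈ List.range rakenne.length,
      ((b : Int) = y - 1 ∨ (b : Int) = y ∨ (b : Int) = y + 1) →
      ∀ a ∈ ([x - 1, x, x + 1] : List Int), 0 ≤ a → a < pvLeveys rakenne →
        a < PySem.Str.len (PySem.List.pyGetD rakenne (b : Int) ""))
instance (x : Int) (y : Int) (rakenne : List String) : Decidable (Pre_laske_ninjat x y rakenne) := by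
  unfold Pre_laske_ninjat; infer_instance

def pvWitness_laske_ninjat : Int × Int × List String := (1, 0, ["N.N", ".N.", "NNN"])

def Spec_laske_ninjat (x : Int) (y : Int) (rakenne : List String) (out : Int) : Prop := out = laske_ninjat_alt x y rakenne
instance (x : Int) (y : Int) (rakenne : List String) (out : Int) : Decidable (Spec_laske_ninjat x y rakenne out) := by unfold Spec_laske_ninjat; infer_instance

-- ===== CLAIM (what is proved, stated in full; the proofs are below) =====
def Claim_equal_laske_ninjat : Prop := ∀ (x : Int) (y : Int) (rakenne : List String), Dom_laske_ninjat x y rakenne → Pre_laske_ninjat x y rakenne → Spec_laske_ninjat x y rakenne (laske_ninjat x y rakenne)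

-- ===== LEMMAS AND PROOFS =====

-- filtering an integer range by an interval test clips the range
theorem pv_filter_pyRange_interval (u v : Int) :
    ∀ (n : Nat) (lo hi : Int), hi - lo ≤ (n : Int) →
    (PySem.List.pyRange lo hi 1).filter (fun a => decide (u ≤ a ∧ a < v))
      = PySem.List.pyRange (max u lo) (min v hi) 1 := by
  intro n
  induction n with
  | zero =>
    intro lo hi h
    rw [PySem.List.pyRange_one_eq_nil (by omega), PySem.List.pyRange_one_eq_nil (by omega)]
    rfl
  | succ m ih =>
    intro lo hi h
    by_cases hlh : lo < hi
    · rw [PySem.List.pyRange_one_cons hlh, List.filter_cons, ih (lo + 1) hi (by omega)]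
      by_cases hin : u ≤ lo ∧ lo < v
      · simp only [decide_eq_true hin, if_true]
        rw [show max u (lo + 1) = lo + 1 by omega, show max u lo = lo by omega]
        exact (PySem.List.pyRange_one_cons (by omega)).symm
      · simp only [decide_eq_false hin, Bool.false_eq_true, if_false]
        by_cases hu : lo < u
        · rw [show max u (lo + 1) = max u lo by omega]
        · rw [PySem.List.pyRange_one_eq_nil (show min v hi ≤ max u (lo + 1) by omega),
            PySem.List.pyRange_one_eq_nil (show min v hi ≤ max u lo by omega)]
    · rw [PySem.List.pyRange_one_eq_nil (by omega), PySem.List.pyRange_one_eq_nil (by omega)]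
      rfl

theorem pv_sum_map_ite (l : List Int) (p : Int → Prop) [DecidablePred p] (f : Int → Int) :
    (l.map (fun b => if p b then f b else 0)).sum
      = ((l.filter (fun b => decide (p b))).map f).sum := by
  induction l with
  | nil => rfl
  | cons hd tl ih =>
    by_cases hp : p hd <;> simp [hp, ih]

-- A's outer loop: enumerate(reversed(xs)) with only the counter used is a loop over row indices
theorem pv_foldl_enumerate_fst {α β : Type} (xs : List α) (g : β → Int → β) (init : β) :
    (PySem.List.enumerate xs 0).foldl (fun n bp => g n bp.1) init
      = (PySem.List.pyRange 0 (xs.length : Int) 1).foldl g init := by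
  have h := PySem.List.map_fst_enumerate xs 0
  calc (PySem.List.enumerate xs 0).foldl (fun n bp => g n bp.1) init
      = ((PySem.List.enumerate xs 0).map (fun bp => bp.1)).foldl g init := by rw [List.foldl_map]
    _ = (PySem.List.pyRange 0 (xs.length : Int) 1).foldl g init := by rw [h, zero_add]

-- per-row counting: A's inner pass over the whole width, reduced to a clipped countP
theorem pv_inner_eq (x y b : Int) (rakenne : List String) (L : Int) (n : Int) :
    (PySem.List.pyRange 0 L 1).foldl
      (fun n a =>
        if a = x - 1 ∨ a = x ∨ a = x + 1 then
          if b = y - 1 ∨ b = y ∨ b = y + 1 then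
            if (PySem.Str.pyGet? (PySem.List.pyGetD rakenne b "") a).getD ' ' = 'N' then n + 1
            else n
          else n
        else n)
      n
    = n + (((PySem.List.pyRange 0 L 1).countP
        (fun a => decide ((a = x - 1 ∨ a = x ∨ a = x + 1) ∧ (b = y - 1 ∨ b = y ∨ b = y + 1) ∧
          (PySem.Str.pyGet? (PySem.List.pyGetD rakenne b "") a).getD ' ' = 'N'))) : Int) := by
  have hfun : (fun (n a : Int) =>
        if a = x - 1 ∨ a = x ∨ a = x + 1 then
          if b = y - 1 ∨ b = y ∨ b = y + 1 then
            if (PySem.Str.pyGet? (PySem.List.pyGetD rakenne b "") a).getD ' ' = 'N' then n + 1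
            else n
          else n
        else n)
      = fun (n a : Int) =>
        if ((a = x - 1 ∨ a = x ∨ a = x + 1) ∧ (b = y - 1 ∨ b = y ∨ b = y + 1) ∧
            (PySem.Str.pyGet? (PySem.List.pyGetD rakenne b "") a).getD ' ' = 'N') then n + 1
        else n := by
    funext n a
    split_ifs <;> first | rfl | tauto
  rw [hfun, PySem.List.foldl_ite_add_one]

theorem pv_countP_clip (x b : Int) (rakenne : List String) (L : Int) :
    ((PySem.List.pyRange 0 L 1).countP
        (fun a => decide ((a = x - 1 ∨ a = x ∨ a = x + 1) ∧
          (PySem.Str.pyGet? (PySem.List.pyGetD rakenne b "") a).getD ' ' = 'N')))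
      = ((PySem.List.pyRange (max (x - 1) 0) (min (x + 2) L) 1).countP
          (fun a => decide ((PySem.Str.pyGet? (PySem.List.pyGetD rakenne b "") a).getD ' ' = 'N'))) := by
  have hfun : (fun (a : Int) => decide ((a = x - 1 ∨ a = x ∨ a = x + 1) ∧
          (PySem.Str.pyGet? (PySem.List.pyGetD rakenne b "") a).getD ' ' = 'N'))
      = fun a => decide ((PySem.Str.pyGet? (PySem.List.pyGetD rakenne b "") a).getD ' ' = 'N')
          && decide (x - 1 ≤ a ∧ a < x + 2) := by
    funext a
    by_cases ht : a = x - 1 ∨ a = x ∨ a = x + 1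
    · have h2 : x - 1 ≤ a ∧ a < x + 2 := by omega
      by_cases hc : (PySem.Str.pyGet? (PySem.List.pyGetD rakenne b "") a).getD ' ' = 'N'
      · rw [decide_eq_true (And.intro ht hc), decide_eq_true hc, decide_eq_true h2]
        rfl
      · rw [decide_eq_false (fun hh => hc hh.2), decide_eq_false hc, Bool.false_and]
    · have h2 : ¬(x - 1 ≤ a ∧ a < x + 2) := by omega
      rw [decide_eq_false (fun hh => ht hh.1), decide_eq_false h2, Bool.and_false]
  rw [hfun, ← List.countP_filter,
    pv_filter_pyRange_interval (x - 1) (x + 2) L.toNat 0 L (by omega)]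

-- ===== VERDICT (by name: the statement is the Claim_ definition above) =====
theorem laske_ninjat_spec : Claim_equal_laske_ninjat := by
  intro x y rakenne _ _
  unfold Spec_laske_ninjat laske_ninjat laske_ninjat_alt
  by_cases h : 0 ≤ x ∧ x < pvLeveys rakenne
  · -- x inside the width: both sides count the clipped neighborhood
    rw [if_pos h]
    have hfilter : (PySem.List.pyRange 0 (pvLeveys rakenne) 1).filter
        (fun _ => decide (0 ≤ x ∧ x < pvLeveys rakenne)) = PySem.List.pyRange 0 (pvLeveys rakenne) 1 := by
      simp [decide_eq_true h]
    simp only [hfilter]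
    -- outer loop of A: enumerate(reversed(...)) only uses the counter b
    rw [pv_foldl_enumerate_fst rakenne.reverse
      (fun n b =>
        (PySem.List.pyRange 0 (pvLeveys rakenne) 1).foldl
          (fun n a =>
            if a = x - 1 ∨ a = x ∨ a = x + 1 then
              if b = y - 1 ∨ b = y ∨ b = y + 1 then
                if (PySem.Str.pyGet? (PySem.List.pyGetD rakenne b "") a).getD ' ' = 'N' then n + 1
                else n
              else n
            else n)
          n)
      0, List.length_reverse]
    -- collapse A's inner loop to a countP
    rw [show (fun (n b : Int) =>
        (PySem.List.pyRange 0 (pvLeveys rakenne) 1).foldl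
          (fun n a =>
            if a = x - 1 ∨ a = x ∨ a = x + 1 then
              if b = y - 1 ∨ b = y ∨ b = y + 1 then
                if (PySem.Str.pyGet? (PySem.List.pyGetD rakenne b "") a).getD ' ' = 'N' then n + 1
                else n
              else n
            else n)
          n)
      = fun (n b : Int) => n + (((PySem.List.pyRange 0 (pvLeveys rakenne) 1).countP
          (fun a => decide ((a = x - 1 ∨ a = x ∨ a = x + 1) ∧ (b = y - 1 ∨ b = y ∨ b = y + 1) ∧
            (PySem.Str.pyGet? (PySem.List.pyGetD rakenne b "") a).getD ' ' = 'N'))) : Int)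
      from funext fun n => funext fun b => pv_inner_eq x y b rakenne (pvLeveys rakenne) n]
    -- collapse B's inner loop to a countP
    rw [show (fun (n b : Int) =>
        (PySem.List.pyRange (max (x - 1) 0) (min (x + 2) (pvLeveys rakenne)) 1).foldl
          (fun n a =>
            if (PySem.Str.pyGet? (PySem.List.pyGetD rakenne b "") a).getD ' ' = 'N' then n + 1
            else n)
          n)
      = fun (n b : Int) => n + (((PySem.List.pyRange (max (x - 1) 0) (min (x + 2) (pvLeveys rakenne)) 1).countP
          (fun a => decide ((PySem.Str.pyGet? (PySem.List.pyGetD rakenne b "") a).getD ' ' = 'N'))) : Int)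
      from funext fun n => funext fun b => PySem.List.foldl_ite_add_one _ _ _]
    rw [PySem.List.foldl_add, PySem.List.foldl_add, zero_add, zero_add]
    -- A's per-row count: zero unless b is a neighbor row, else the clipped count
    rw [show (fun b : Int => (((PySem.List.pyRange 0 (pvLeveys rakenne) 1).countP
          (fun a => decide ((a = x - 1 ∨ a = x ∨ a = x + 1) ∧ (b = y - 1 ∨ b = y ∨ b = y + 1) ∧
            (PySem.Str.pyGet? (PySem.List.pyGetD rakenne b "") a).getD ' ' = 'N'))) : Int))
      = fun b : Int => if (b = y - 1 ∨ b = y ∨ b = y + 1) then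
          (((PySem.List.pyRange (max (x - 1) 0) (min (x + 2) (pvLeveys rakenne)) 1).countP
            (fun a => decide ((PySem.Str.pyGet? (PySem.List.pyGetD rakenne b "") a).getD ' ' = 'N'))) : Int)
        else 0
      from funext fun b => by
        by_cases hb : b = y - 1 ∨ b = y ∨ b = y + 1
        · rw [if_pos hb, ← pv_countP_clip x b rakenne (pvLeveys rakenne)]
          congr 1
          apply List.countP_congr
          intro a _
          simp only [decide_eq_true_eq]
          tauto
        · rw [if_neg hb]
          have hz : ((PySem.List.pyRange 0 (pvLeveys rakenne) 1).countP
              (fun a => decide ((a = x - 1 ∨ a = x ∨ a = x + 1) ∧ (b = y - 1 ∨ b = y ∨ b = y + 1) ∧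
                (PySem.Str.pyGet? (PySem.List.pyGetD rakenne b "") a).getD ' ' = 'N'))) = 0 := by
            apply List.countP_eq_zero.mpr
            intro a _
            simp [hb]
          rw [hz]
          rfl]
    rw [pv_sum_map_ite (PySem.List.pyRange 0 (rakenne.length : Int) 1)
      (fun b : Int => b = y - 1 ∨ b = y ∨ b = y + 1)
      (fun b : Int => (((PySem.List.pyRange (max (x - 1) 0) (min (x + 2) (pvLeveys rakenne)) 1).countP
        (fun a => decide ((PySem.Str.pyGet? (PySem.List.pyGetD rakenne b "") a).getD ' ' = 'N'))) : Int))]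
    rw [show (fun b : Int => decide (b = y - 1 ∨ b = y ∨ b = y + 1))
        = (fun b : Int => decide (y - 1 ≤ b ∧ b < y + 2))
      from funext fun b => decide_eq_decide.mpr (by omega)]
    rw [pv_filter_pyRange_interval (y - 1) (y + 2) rakenne.length 0 (rakenne.length : Int) (by omega)]
  · -- x outside the width: A's generator is empty, B returns 0
    rw [if_neg h]
    have hfilter : (PySem.List.pyRange 0 (pvLeveys rakenne) 1).filter
        (fun _ => decide (0 ≤ x ∧ x < pvLeveys rakenne)) = [] := by
      simp [decide_eq_false h]
    simp only [hfilter, List.foldl_nil, PySem.List.foldl_ignore]
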